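-- pv_equiv track=rewrite | github.com/alexriderspy/COL703 | Assignment 2 Q3/solve.py | check
-- ===== SOURCE A (Python) =====
-- import copy,math
--
-- def remove_dup (lis):
--     return [*set(lis)]
--
-- def check(lis,lis1,lis2):
--     lis1 = lis1 + lis2
--     lis1 = remove_dup(lis1)
--     for i in range(len(lis1)):
--         for j in range(i+1,len(lis1)):
--             if lis1[i] == -lis1[j]:
--                 tmp = copy.deepcopy(lis1)
--                 tmp.remove(lis1[i])
--                 tmp.remove(lis1[j])
--                 tmp.sort()
--                 if tmp == lis:
--                     return True
--     return False
-- ===== SOURCE B (Python) =====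
-- def check(lis, lis1, lis2):
--     s = set(lis1 + lis2)
--     removed = s - set(lis)
--     if len(removed) != 2 or sum(removed) != 0:
--         return False
--     return sorted(s - removed) == lis
-- ===== Notes on version B (the rewrite author's own statement) =====
-- stated objective: faster
-- what changed: Instead of scanning all O(n^2) value pairs of the deduplicated pool and for each opposite pair removing the two values and re-sorting, B computes the unique candidate pair directly as the set difference set(lis1+lis2) - set(lis), checks it has two elements summing to zero, and compares one sorted remainder with lis.
import Mathlib
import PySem

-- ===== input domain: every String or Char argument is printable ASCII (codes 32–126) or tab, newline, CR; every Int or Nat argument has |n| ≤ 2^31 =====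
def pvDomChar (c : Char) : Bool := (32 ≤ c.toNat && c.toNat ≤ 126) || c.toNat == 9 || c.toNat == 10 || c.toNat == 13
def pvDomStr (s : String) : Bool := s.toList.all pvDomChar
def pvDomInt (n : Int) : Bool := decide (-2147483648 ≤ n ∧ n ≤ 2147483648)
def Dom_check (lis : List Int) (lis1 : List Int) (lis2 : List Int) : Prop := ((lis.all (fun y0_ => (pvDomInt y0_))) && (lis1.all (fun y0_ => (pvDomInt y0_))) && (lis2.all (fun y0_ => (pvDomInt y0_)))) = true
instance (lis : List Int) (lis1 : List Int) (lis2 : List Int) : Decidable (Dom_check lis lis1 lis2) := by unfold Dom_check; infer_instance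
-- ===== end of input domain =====

-- B replaces A's scan over all value pairs (with a remove+sort per opposite pair) by computing
-- the candidate pair directly as the set difference set(lis1+lis2) - set(lis) and checking it;
-- the theorem below proves the RETURN values equal (neither version mutates its arguments).

-- ===== PORT A =====
-- remove_dup: [*set(lis)] — distinct elements (PySem.Set; Python's hash iteration order is not
-- modelled, but check's Boolean result does not depend on that order, as the proof shows).
def removeDup (l : List Int) : List Int := PySem.Set.ofList l

def check (lis : List Int) (lis1 : List Int) (lis2 : List Int) : Bool :=
  let L : List Int := removeDup (lis1 ++ lis2)
  (List.range L.length).any (fun i =>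
    (List.range' (i + 1) (L.length - (i + 1))).any (fun j =>
      match PySem.List.pyGet? L (i : Int), PySem.List.pyGet? L (j : Int) with
      | some a, some b =>
        if a = -b then
          -- tmp.remove(a); tmp.remove(b): both always succeed here (a, b are members),
          -- the none branches are unreachable
          match PySem.List.remove? L a with
          | some t =>
            match PySem.List.remove? t b with
            | some t2 => decide (PySem.List.sorted t2 (fun x => x) false = lis)
            | none => false
          | none => false
        else false
      | _, _ => false))

-- ===== PORT B =====
def check_alt (lis : List Int) (lis1 : List Int) (lis2 : List Int) : Bool :=
  let s : PySem.Set Int := PySem.Set.ofList (lis1 ++ lis2)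
  let removed : PySem.Set Int := PySem.Set.diff s (PySem.Set.ofList lis)
  if removed.length ≠ 2 ∨ removed.sum ≠ 0 then false
  else decide (PySem.List.sorted (PySem.Set.diff s removed) (fun x => x) false = lis)

-- ===== PRECONDITION & SPEC =====
def Spec_check (lis : List Int) (lis1 : List Int) (lis2 : List Int) (out : Bool) : Prop := out = check_alt lis lis1 lis2
instance (lis : List Int) (lis1 : List Int) (lis2 : List Int) (out : Bool) : Decidable (Spec_check lis lis1 lis2 out) := by unfold Spec_check; infer_instance

-- ===== CLAIM (what is proved, stated in full; the proofs are below) =====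
def Claim_equal_check : Prop := ∀ (lis : List Int) (lis1 : List Int) (lis2 : List Int), Dom_check lis lis1 lis2 → Spec_check lis lis1 lis2 (check lis lis1 lis2)

-- ===== LEMMAS AND PROOFS =====

theorem anyPairs_iff (lis L : List Int) (hnd : L.Nodup) :
    ((List.range L.length).any (fun i =>
      (List.range' (i + 1) (L.length - (i + 1))).any (fun j =>
        match PySem.List.pyGet? L (i : Int), PySem.List.pyGet? L (j : Int) with
        | some a, some b =>
          if a = -b then
            match PySem.List.remove? L a with
            | some t =>
              match PySem.List.remove? t b with
              | some t2 => decide (PySem.List.sorted t2 (fun x => x) false = lis)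
              | none => false
            | none => false
          else false
        | _, _ => false))) = true ↔
      ∃ a b, a ∈ L ∧ b ∈ L ∧ a ≠ b ∧ a = -b ∧
        PySem.List.sorted ((L.erase a).erase b) (fun x => x) false = lis := by
  constructor
  · intro h
    simp only [List.any_eq_true, List.mem_range, List.mem_range'_1] at h
    obtain ⟨i, hi, j, ⟨hij, hj⟩, hbody⟩ := h
    have hj' : j < L.length := by omega
    rw [PySem.List.pyGet?_natCast, PySem.List.pyGet?_natCast,
        List.getElem?_eq_getElem hi, List.getElem?_eq_getElem hj'] at hbody
    dsimp only at hbody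
    have hne : L[i] ≠ L[j] := fun hab => by
      have := (hnd.getElem_inj_iff).mp hab; omega
    have hmema : L[i] ∈ L := List.getElem_mem hi
    have hmemb : L[j] ∈ L := List.getElem_mem hj'
    by_cases hopp : L[i] = -L[j]
    · rw [if_pos hopp, PySem.List.remove?_eq_some_erase L _ hmema] at hbody
      dsimp only at hbody
      rw [PySem.List.remove?_eq_some_erase (L.erase L[i]) _
            ((List.mem_erase_of_ne hne.symm).mpr hmemb)] at hbody
      dsimp only at hbody
      simp only [decide_eq_true_eq] at hbody
      exact ⟨L[i], L[j], hmema, hmemb, hne, hopp, hbody⟩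
    · rw [if_neg hopp] at hbody; exact absurd hbody (by simp)
  · rintro ⟨a, b, hmema, hmemb, hne, hopp, hsort⟩
    obtain ⟨i, hi, ha⟩ := List.getElem_of_mem hmema
    obtain ⟨j, hj, hb⟩ := List.getElem_of_mem hmemb
    have hij : i ≠ j := by intro h; subst h; exact hne (ha.symm.trans hb)
    simp only [List.any_eq_true, List.mem_range, List.mem_range'_1]
    rcases Nat.lt_or_ge i j with hlt | hge
    · refine ⟨i, hi, j, ⟨by omega, by omega⟩, ?_⟩
      rw [PySem.List.pyGet?_natCast, PySem.List.pyGet?_natCast,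
          List.getElem?_eq_getElem hi, List.getElem?_eq_getElem hj]
      dsimp only
      rw [ha, hb, if_pos hopp, PySem.List.remove?_eq_some_erase L a hmema]
      dsimp only
      rw [PySem.List.remove?_eq_some_erase (L.erase a) b
            ((List.mem_erase_of_ne hne.symm).mpr hmemb)]
      simp [hsort]
    · have hlt : j < i := by omega
      refine ⟨j, hj, i, ⟨by omega, by omega⟩, ?_⟩
      rw [PySem.List.pyGet?_natCast, PySem.List.pyGet?_natCast,
          List.getElem?_eq_getElem hj, List.getElem?_eq_getElem hi]
      dsimp only
      have hopp' : b = -a := by omega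
      rw [hb, ha, if_pos hopp', PySem.List.remove?_eq_some_erase L b hmemb]
      dsimp only
      rw [PySem.List.remove?_eq_some_erase (L.erase b) a
            ((List.mem_erase_of_ne hne).mpr hmema)]
      rw [List.erase_comm] at hsort
      simp [hsort]


theorem check_iff_exists (lis lis1 lis2 : List Int) :
    check lis lis1 lis2 = true ↔
      ∃ a b, a ∈ removeDup (lis1 ++ lis2) ∧ b ∈ removeDup (lis1 ++ lis2) ∧ a ≠ b ∧ a = -b ∧
        PySem.List.sorted (((removeDup (lis1 ++ lis2)).erase a).erase b) (fun x => x) false = lis :=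
  anyPairs_iff lis (removeDup (lis1 ++ lis2)) (PySem.Set.nodup_ofList _)

theorem erase_erase_eq_filter (L : List Int) (hnd : L.Nodup) (a b : Int) :
    (L.erase a).erase b = L.filter (fun x => x != a && x != b) := by
  rw [hnd.erase_eq_filter a, (hnd.filter _).erase_eq_filter b, List.filter_filter]
  exact List.filter_congr (fun x _ => by simp [Bool.and_comm])

theorem exists_iff_diff_gen (lis L : List Int) (hnd : L.Nodup) :
    (∃ a b, a ∈ L ∧ b ∈ L ∧ a ≠ b ∧ a = -b ∧
        PySem.List.sorted ((L.erase a).erase b) (fun x => x) false = lis) ↔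
      ((PySem.Set.diff L (PySem.Set.ofList lis)).length = 2 ∧
       (PySem.Set.diff L (PySem.Set.ofList lis)).sum = 0 ∧
       PySem.List.sorted (PySem.Set.diff L (PySem.Set.diff L (PySem.Set.ofList lis)))
         (fun x => x) false = lis) := by
  have hmemE : ∀ x, x ∈ PySem.Set.diff L (PySem.Set.ofList lis) ↔ x ∈ L ∧ x ∉ lis := by
    intro x
    rw [PySem.Set.mem_diff]
    simp [PySem.Set.mem_ofList]
  have hEnd : (PySem.Set.diff L (PySem.Set.ofList lis)).Nodup := List.Nodup.filter _ hnd
  constructor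
  · rintro ⟨a, b, hma, hmb, hne, hopp, hsort⟩
    rw [erase_erase_eq_filter L hnd a b] at hsort
    have hmem_lis : ∀ x, x ∈ lis ↔ x ∈ L ∧ x ≠ a ∧ x ≠ b := by
      intro x
      rw [← hsort, PySem.List.mem_sorted, List.mem_filter]
      simp
    have hEchar : ∀ x, x ∈ PySem.Set.diff L (PySem.Set.ofList lis) ↔ x = a ∨ x = b := by
      intro x
      rw [hmemE x]
      constructor
      · rintro ⟨hxL, hxlis⟩
        by_contra hc
        push Not at hc
        exact hxlis ((hmem_lis x).mpr ⟨hxL, hc.1, hc.2⟩)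
      · rintro (rfl | rfl)
        · exact ⟨hma, fun h => (((hmem_lis x).mp h).2.1 rfl)⟩
        · exact ⟨hmb, fun h => (((hmem_lis x).mp h).2.2 rfl)⟩
    have hperm : (PySem.Set.diff L (PySem.Set.ofList lis)).Perm [a, b] := by
      rw [List.perm_ext_iff_of_nodup hEnd (by simp [hne])]
      intro x; rw [hEchar x]; simp
    refine ⟨by simpa using hperm.length_eq, by have := hperm.sum_eq; simp at this; omega, ?_⟩
    have hkept : PySem.Set.diff L (PySem.Set.diff L (PySem.Set.ofList lis)) =
        L.filter (fun x => x != a && x != b) := by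
      refine List.filter_congr (fun x hx => ?_)
      have : (PySem.Set.diff L (PySem.Set.ofList lis)).contains x =
          decide (x = a ∨ x = b) := by
        simp [hEchar x]
      rw [this]
      simp; tauto
    rw [hkept]; exact hsort
  · rintro ⟨hlen, hsum, hsort⟩
    obtain ⟨a, b, hE⟩ : ∃ a b, PySem.Set.diff L (PySem.Set.ofList lis) = [a, b] := by
      match h : PySem.Set.diff L (PySem.Set.ofList lis), hlen with
      | [a, b], _ => exact ⟨a, b, rfl⟩
    have hma : a ∈ L ∧ a ∉ lis := (hmemE a).mp (by rw [hE]; simp)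
    have hmb : b ∈ L ∧ b ∉ lis := (hmemE b).mp (by rw [hE]; simp)
    have hne : a ≠ b := by
      rw [hE] at hEnd; simp at hEnd; exact hEnd
    have hopp : a = -b := by rw [hE] at hsum; simp at hsum; omega
    refine ⟨a, b, hma.1, hmb.1, hne, hopp, ?_⟩
    rw [erase_erase_eq_filter L hnd a b]
    have hkept : PySem.Set.diff L (PySem.Set.diff L (PySem.Set.ofList lis)) =
        L.filter (fun x => x != a && x != b) := by
      refine List.filter_congr (fun x hx => ?_)
      rw [hE]
      simp
      tauto
    rw [← hkept]; exact hsort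

theorem check_alt_iff (lis lis1 lis2 : List Int) :
    check_alt lis lis1 lis2 = true ↔
      (PySem.Set.diff (PySem.Set.ofList (lis1 ++ lis2)) (PySem.Set.ofList lis)).length = 2 ∧
      (PySem.Set.diff (PySem.Set.ofList (lis1 ++ lis2)) (PySem.Set.ofList lis)).sum = 0 ∧
      PySem.List.sorted (PySem.Set.diff (PySem.Set.ofList (lis1 ++ lis2))
          (PySem.Set.diff (PySem.Set.ofList (lis1 ++ lis2)) (PySem.Set.ofList lis))) (fun x => x) false = lis := by
  unfold check_alt
  dsimp only
  split_ifs with h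
  · simp only [false_iff]
    rintro ⟨h1, h2, -⟩
    rcases h with h | h <;> exact h (by assumption)
  · push Not at h
    simp [h.1, h.2]

theorem exists_iff_diff (lis lis1 lis2 : List Int) :
    (∃ a b, a ∈ removeDup (lis1 ++ lis2) ∧ b ∈ removeDup (lis1 ++ lis2) ∧ a ≠ b ∧ a = -b ∧
        PySem.List.sorted (((removeDup (lis1 ++ lis2)).erase a).erase b) (fun x => x) false = lis) ↔
      ((PySem.Set.diff (PySem.Set.ofList (lis1 ++ lis2)) (PySem.Set.ofList lis)).length = 2 ∧
      (PySem.Set.diff (PySem.Set.ofList (lis1 ++ lis2)) (PySem.Set.ofList lis)).sum = 0 ∧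
      PySem.List.sorted (PySem.Set.diff (PySem.Set.ofList (lis1 ++ lis2))
          (PySem.Set.diff (PySem.Set.ofList (lis1 ++ lis2)) (PySem.Set.ofList lis))) (fun x => x) false = lis) :=
  exists_iff_diff_gen lis (PySem.Set.ofList (lis1 ++ lis2)) (PySem.Set.nodup_ofList _)

-- ===== VERDICT (by name: the statement is the Claim_ definition above) =====
theorem check_spec : Claim_equal_check := by
  intro lis lis1 lis2 _
  unfold Spec_check
  exact Bool.eq_iff_iff.mpr
    ((check_iff_exists lis lis1 lis2).trans
      ((exists_iff_diff lis lis1 lis2).trans (check_alt_iff lis lis1 lis2).symm))
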